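-- pv_equiv track=rewrite | github.com/DumitruIulian/CodeAtlas | backend/app/core/history.py | compute_health_from_hotspots
-- ===== SOURCE A (Python) =====
-- from typing import Any, Dict, List, Optional
--
-- def compute_health_from_hotspots(hotspots: List[Dict[str, Any]]) -> str:
--     """
--     Derivează un verdict de sănătate din lista de hotspots (tipuri: Security, Bug, Risk, Debt, Complexity, Clean).
--     """
--     if not hotspots:
--         return "Clean Architecture"
--     types_seen = set()
--     for h in hotspots:
--         t = (h.get("type") or h.get("category") or "").strip().lower()
--         if t:
--             types_seen.add(t)
--     if any(x in types_seen for x in ("security", "bug", "risk")):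
--         return "Security / Bug Risk"
--     if any(x in types_seen for x in ("debt", "complexity")):
--         return "Technical Debt / Complexity"
--     return "Clean Architecture"
-- ===== SOURCE B (Python) =====
-- def _rank(t):
--     if t in ("security", "bug", "risk"):
--         return 2
--     if t in ("debt", "complexity"):
--         return 1
--     return 0
--
-- def compute_health_from_hotspots(hotspots):
--     worst = 0
--     for h in hotspots:
--         t = (h.get("type") or h.get("category") or "").strip().lower()
--         worst = max(worst, _rank(t))
--     if worst == 2:
--         return "Security / Bug Risk"
--     if worst == 1:
--         return "Technical Debt / Complexity"
--     return "Clean Architecture"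
-- ===== Notes on version B (the rewrite author's own statement) =====
-- stated objective: alternative
-- what changed: Replaces the build-a-set-of-types-then-membership-check structure by a single pass that folds each hotspot's numeric severity rank (critical=2, debt=1, else 0) into a running maximum, and maps the final max to the verdict; no set and no second classification stage is kept.
import Mathlib
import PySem

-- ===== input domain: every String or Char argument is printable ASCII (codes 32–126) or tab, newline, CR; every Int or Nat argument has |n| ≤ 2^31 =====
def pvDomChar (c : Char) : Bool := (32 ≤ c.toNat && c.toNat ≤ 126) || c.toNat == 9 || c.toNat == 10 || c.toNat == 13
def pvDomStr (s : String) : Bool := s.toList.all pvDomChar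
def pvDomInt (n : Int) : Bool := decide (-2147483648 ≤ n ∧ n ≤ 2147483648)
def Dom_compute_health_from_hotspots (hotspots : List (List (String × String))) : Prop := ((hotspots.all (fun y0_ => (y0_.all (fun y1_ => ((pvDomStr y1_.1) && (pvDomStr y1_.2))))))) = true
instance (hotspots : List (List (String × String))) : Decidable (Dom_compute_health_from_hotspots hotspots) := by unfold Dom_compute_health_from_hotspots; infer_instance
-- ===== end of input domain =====

-- B replaces A's two-stage structure (collect a set of normalized types, then two
-- membership checks) by one fold of numeric severity ranks into a running maximum
-- mapped to the verdict; same results, similar cost (objective: alternative).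

-- shared helper: the normalization `(h.get("type") or h.get("category") or "").strip().lower()`
-- (Python `a or b` takes `a` unless it is falsy, here None or the empty string)
def pvGetTruthy (h : List (String × String)) (k : String) (fallback : String) : String :=
  match h.lookup k with
  | some s => if s = "" then fallback else s
  | none => fallback

def pvNorm (h : List (String × String)) : String :=
  PySem.Str.lower (PySem.Str.strip (pvGetTruthy h "type" (pvGetTruthy h "category" "")))

-- ===== PORT A =====
def compute_health_from_hotspots (hotspots : List (List (String × String))) : String :=
  if hotspots = [] then "Clean Architecture"
  else
    let types_seen := hotspots.foldl (fun s h =>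
      let t := pvNorm h
      if t = "" then s else PySem.Set.add s t) (PySem.Set.empty : PySem.Set String)
    if ["security", "bug", "risk"].any (fun x => PySem.Set.contains types_seen x) then
      "Security / Bug Risk"
    else if ["debt", "complexity"].any (fun x => PySem.Set.contains types_seen x) then
      "Technical Debt / Complexity"
    else "Clean Architecture"

-- ===== PORT B =====
def pvRankB (t : String) : Nat :=
  if ["security", "bug", "risk"].contains t then 2
  else if ["debt", "complexity"].contains t then 1
  else 0

def compute_health_from_hotspots_alt (hotspots : List (List (String × String))) : String :=
  let worst := hotspots.foldl (fun w h => max w (pvRankB (pvNorm h))) 0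
  if worst = 2 then "Security / Bug Risk"
  else if worst = 1 then "Technical Debt / Complexity"
  else "Clean Architecture"

-- ===== PRECONDITION & SPEC =====
def Spec_compute_health_from_hotspots (hotspots : List (List (String × String))) (out : String) : Prop := out = compute_health_from_hotspots_alt hotspots
instance (hotspots : List (List (String × String))) (out : String) : Decidable (Spec_compute_health_from_hotspots hotspots out) := by unfold Spec_compute_health_from_hotspots; infer_instance

-- ===== CLAIM (what is proved, stated in full; the proofs are below) =====
def Claim_equal_compute_health_from_hotspots : Prop := ∀ (hotspots : List (List (String × String))), Dom_compute_health_from_hotspots hotspots → Spec_compute_health_from_hotspots hotspots (compute_health_from_hotspots hotspots)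

-- ===== LEMMAS AND PROOFS =====

-- membership in A's accumulated set
lemma mem_pvLoop (hs : List (List (String × String))) (s : PySem.Set String) (x : String) :
    x ∈ hs.foldl (fun s h =>
      let t := pvNorm h
      if t = "" then s else PySem.Set.add s t) s ↔
    x ∈ s ∨ ∃ h ∈ hs, pvNorm h = x ∧ x ≠ "" := by
  induction hs generalizing s with
  | nil => simp
  | cons a as ih =>
    simp only [List.foldl_cons, List.mem_cons]
    by_cases h0 : pvNorm a = ""
    · rw [if_pos h0, ih]
      constructor
      · rintro (hx | ⟨h, hh, rfl, hne⟩)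
        · exact Or.inl hx
        · exact Or.inr ⟨h, Or.inr hh, rfl, hne⟩
      · rintro (hx | ⟨h, hh | hh, rfl, hne⟩)
        · exact Or.inl hx
        · exact absurd (hh ▸ h0) hne
        · exact Or.inr ⟨h, hh, rfl, hne⟩
    · rw [if_neg h0, ih]
      simp only [PySem.Set.mem_add]
      constructor
      · rintro (⟨hx | rfl⟩ | ⟨h, hh, rfl, hne⟩)
        · exact Or.inl hx
        · exact Or.inr ⟨a, Or.inl rfl, rfl, h0⟩
        · exact Or.inr ⟨h, Or.inr hh, rfl, hne⟩
      · rintro (hx | ⟨h, hh | hh, rfl, hne⟩)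
        · exact Or.inl (Or.inl hx)
        · exact Or.inl (Or.inr (hh ▸ rfl))
        · exact Or.inr ⟨h, hh, rfl, hne⟩

-- A's membership test equals a direct scan of the list
lemma pvCheck_eq (hs : List (List (String × String))) (keys : List String)
    (hk : "" ∉ keys) :
    (keys.any fun x => PySem.Set.contains
        (hs.foldl (fun s h =>
          let t := pvNorm h
          if t = "" then s else PySem.Set.add s t) (PySem.Set.empty : PySem.Set String)) x)
      = hs.any (fun h => keys.contains (pvNorm h)) := by
  apply Bool.eq_iff_iff.mpr
  simp only [List.any_eq_true, PySem.Set.contains_iff, mem_pvLoop, List.contains_iff_mem]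
  constructor
  · rintro ⟨x, hxk, hx | ⟨h, hh, rfl, -⟩⟩
    · simp [PySem.Set.empty] at hx
    · exact ⟨h, hh, hxk⟩
  · rintro ⟨h, hh, hk'⟩
    exact ⟨pvNorm h, hk', Or.inr ⟨h, hh, rfl, fun he => hk (he ▸ hk')⟩⟩

-- B's fold: pulling the accumulator out as a max
lemma worst_acc (hs : List (List (String × String))) (acc : Nat) :
    hs.foldl (fun w h => max w (pvRankB (pvNorm h))) acc
      = max acc (hs.foldl (fun w h => max w (pvRankB (pvNorm h))) 0) := by
  induction hs generalizing acc with
  | nil => simp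
  | cons a as ih =>
    rw [List.foldl_cons, ih, List.foldl_cons, ih (max 0 _)]
    omega

lemma worst_cons (a : List (String × String)) (as : List (List (String × String))) :
    (a :: as).foldl (fun w h => max w (pvRankB (pvNorm h))) 0
      = max (pvRankB (pvNorm a)) (as.foldl (fun w h => max w (pvRankB (pvNorm h))) 0) := by
  rw [List.foldl_cons, worst_acc]; omega

lemma worst_le_two (hs : List (List (String × String))) :
    hs.foldl (fun w h => max w (pvRankB (pvNorm h))) 0 ≤ 2 := by
  induction hs with
  | nil => simp
  | cons a as ih =>
    rw [worst_cons]
    have : pvRankB (pvNorm a) ≤ 2 := by unfold pvRankB; split_ifs <;> omega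
    omega

lemma worst_eq_two_iff (hs : List (List (String × String))) :
    hs.foldl (fun w h => max w (pvRankB (pvNorm h))) 0 = 2 ↔
      ∃ h ∈ hs, pvRankB (pvNorm h) = 2 := by
  induction hs with
  | nil => simp
  | cons a as ih =>
    rw [worst_cons]
    simp only [List.mem_cons]
    constructor
    · intro h2
      by_cases ha : pvRankB (pvNorm a) = 2
      · exact ⟨a, Or.inl rfl, ha⟩
      · obtain ⟨h, hh, hr⟩ := ih.mp (by omega)
        exact ⟨h, Or.inr hh, hr⟩
    · rintro ⟨h, rfl | hh, hr⟩
      · have hle := worst_le_two as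
        omega
      · have := ih.mpr ⟨h, hh, hr⟩
        have ha : pvRankB (pvNorm a) ≤ 2 := by unfold pvRankB; split_ifs <;> omega
        omega

lemma worst_eq_zero_iff (hs : List (List (String × String))) :
    hs.foldl (fun w h => max w (pvRankB (pvNorm h))) 0 = 0 ↔
      ∀ h ∈ hs, pvRankB (pvNorm h) = 0 := by
  induction hs with
  | nil => simp
  | cons a as ih =>
    rw [worst_cons]
    simp only [List.mem_cons, Nat.max_eq_zero_iff, ih]
    constructor
    · rintro ⟨h0, hall⟩ h (rfl | hh)
      · exact h0
      · exact hall h hh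
    · intro hall
      exact ⟨hall a (Or.inl rfl), fun h hh => hall h (Or.inr hh)⟩

-- ===== VERDICT (by name: the statement is the Claim_ definition above) =====
theorem compute_health_from_hotspots_spec : Claim_equal_compute_health_from_hotspots := by
  intro hs _
  unfold Spec_compute_health_from_hotspots compute_health_from_hotspots compute_health_from_hotspots_alt
  by_cases hnil : hs = []
  · subst hnil; decide
  · rw [if_neg hnil]
    simp only [pvCheck_eq hs ["security", "bug", "risk"] (by decide),
        pvCheck_eq hs ["debt", "complexity"] (by decide)]
    set W := hs.foldl (fun w h => max w (pvRankB (pvNorm h))) 0 with hW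
    by_cases hc : hs.any (fun h => ["security", "bug", "risk"].contains (pvNorm h)) = true
    · rw [if_pos hc]
      have : W = 2 := by
        rw [hW, worst_eq_two_iff]
        obtain ⟨h, hh, hk⟩ := List.any_eq_true.mp hc
        exact ⟨h, hh, by unfold pvRankB; rw [if_pos hk]⟩
      rw [this]
      decide
    · rw [if_neg hc]
      have hno2 : ∀ h ∈ hs, pvRankB (pvNorm h) ≠ 2 := by
        intro h hh he
        apply hc
        refine List.any_eq_true.mpr ⟨h, hh, ?_⟩
        unfold pvRankB at he
        by_contra hk
        rw [if_neg hk] at he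
        split_ifs at he <;> omega
      by_cases hd : hs.any (fun h => ["debt", "complexity"].contains (pvNorm h)) = true
      · rw [if_pos hd]
        have hW1 : W = 1 := by
          obtain ⟨h, hh, hk⟩ := List.any_eq_true.mp hd
          have h1 : pvRankB (pvNorm h) = 1 ∨ pvRankB (pvNorm h) = 2 := by
            unfold pvRankB; split_ifs with h2 <;> simp_all
          have h1' : pvRankB (pvNorm h) = 1 := by
            rcases h1 with h1 | h1
            · exact h1
            · exact absurd h1 (hno2 h hh)
          have hne0 : W ≠ 0 := by
            rw [hW, Ne, worst_eq_zero_iff]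
            intro hall
            exact absurd (hall h hh) (by omega)
          have hne2 : W ≠ 2 := by
            rw [hW, Ne, worst_eq_two_iff]
            rintro ⟨h', hh', hr'⟩
            exact hno2 h' hh' hr'
          have := worst_le_two hs
          rw [← hW] at this
          omega
        rw [hW1]
        decide
      · rw [if_neg hd]
        have hW0 : W = 0 := by
          rw [hW, worst_eq_zero_iff]
          intro h hh
          have hnd : ¬ (["debt", "complexity"].contains (pvNorm h) = true) := by
            intro hk
            exact hd (List.any_eq_true.mpr ⟨h, hh, hk⟩)
          have hnc : ¬ (["security", "bug", "risk"].contains (pvNorm h) = true) := by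
            intro hk
            exact hc (List.any_eq_true.mpr ⟨h, hh, hk⟩)
          unfold pvRankB
          rw [if_neg hnc, if_neg hnd]
        rw [hW0]
        decide
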